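-- pv_equiv track=rewrite | github.com/herbras/bantu-ai-turathTool | src/workflows/turath_research_workflow_backup.py | _extract_meaningful_excerpt
-- ===== SOURCE A (Python) =====
-- def _extract_meaningful_excerpt(content: str, max_length: int = 400) -> str:
--     """Extract meaningful excerpt from content"""
--     if not content:
--         return "Konten tidak tersedia"
--
--     # Split into paragraphs and find the most relevant one
--     paragraphs = [p.strip() for p in content.split("\n") if p.strip()]
--
--     # Find paragraph with relevant keywords
--     relevant_para = None
--     for para in paragraphs:
--         if any(
--             keyword in para.lower()
--             for keyword in [
--                 "hukum",
--                 "fikih",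
--                 "halal",
--                 "haram",
--                 "disamak",
--                 "kulit",
--                 "recek",
--             ]
--         ):
--             relevant_para = para
--             break
--
--     # Use first substantial paragraph if no relevant one found
--     if not relevant_para:
--         for para in paragraphs:
--             if len(para) > 50:
--                 relevant_para = para
--                 break
--
--     # Use beginning of content if no good paragraph found
--     if not relevant_para:
--         relevant_para = content[:max_length]
--
--     # Truncate if too long
--     if len(relevant_para) > max_length:
--         relevant_para = relevant_para[:max_length] + "..."
--
--     return relevant_para
-- ===== SOURCE B (Python) =====
-- def _extract_meaningful_excerpt(content: str, max_length: int = 400) -> str: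
--     """Single pass over the lines: track the first keyword paragraph and the
--     first substantial (>50 chars) paragraph, then pick by priority."""
--     if not content:
--         return "Konten tidak tersedia"
--
--     KEYWORDS = ("hukum", "fikih", "halal", "haram", "disamak", "kulit", "recek")
--     kw_para = None
--     sub_para = None
--     for raw in content.split("\n"):
--         para = raw.strip()
--         if not para:
--             continue
--         low = para.lower()
--         if any(k in low for k in KEYWORDS):
--             kw_para = para
--             break  # keyword paragraphs have absolute priority
--         if sub_para is None and len(para) > 50:
--             sub_para = para
--
--     if kw_para is not None:
--         best = kw_para
--     elif sub_para is not None: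
--         best = sub_para
--     else:
--         best = content[:max_length]
--
--     if len(best) > max_length:
--         best = best[:max_length] + "..."
--     return best
-- ===== Notes on version B (the rewrite author's own statement) =====
-- stated objective: simpler
-- what changed: A precomputes a stripped-paragraph list and runs two sequential scans (keyword, then length>50); B makes one pass over the raw lines, stripping as it goes and tracking both the first keyword paragraph and the first substantial paragraph, then picks by priority.
import Mathlib
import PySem

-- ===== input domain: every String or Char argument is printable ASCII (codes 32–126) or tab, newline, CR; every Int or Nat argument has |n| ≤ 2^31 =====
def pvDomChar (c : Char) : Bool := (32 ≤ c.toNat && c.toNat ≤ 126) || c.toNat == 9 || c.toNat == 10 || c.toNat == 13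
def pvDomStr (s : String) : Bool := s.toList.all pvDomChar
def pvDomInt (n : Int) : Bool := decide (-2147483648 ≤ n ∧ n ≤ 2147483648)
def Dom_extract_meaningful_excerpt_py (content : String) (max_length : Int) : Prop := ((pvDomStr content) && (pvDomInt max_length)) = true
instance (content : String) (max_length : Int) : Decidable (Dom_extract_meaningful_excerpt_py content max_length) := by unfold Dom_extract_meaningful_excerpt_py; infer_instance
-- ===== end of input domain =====

-- B replaces A's two sequential scans over a precomputed paragraph list by one pass
-- over the raw lines maintaining both candidates (objective: simpler decomposition).

-- ===== PORT A =====
def pvKeywords : List String :=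
  ["hukum", "fikih", "halal", "haram", "disamak", "kulit", "recek"]

-- [p.strip() for p in content.split("\n") if p.strip()]
def pvParas (raws : List String) : List String :=
  raws.filterMap (fun p => let s := PySem.Str.strip p; if s = "" then none else some s)

def pvHasKwA (para : String) : Bool :=
  pvKeywords.any (fun keyword => PySem.Str.isIn keyword (PySem.Str.lower para))

-- first 'for para in paragraphs: if any(...): relevant_para = para; break'
def pvFindKwA : List String → Option String
  | [] => none
  | para :: rest => if pvHasKwA para then some para else pvFindKwA rest

-- second 'for para in paragraphs: if len(para) > 50: relevant_para = para; break'
def pvFindSubA : List String → Option String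
  | [] => none
  | para :: rest => if 50 < PySem.Str.len para then some para else pvFindSubA rest

def extract_meaningful_excerpt_py (content : String) (max_length : Int) : String :=
  if content = "" then "Konten tidak tersedia"
  else
    -- the comprehension is the helper pvParas; sep "\n" ≠ "", so split? is some
    let paragraphs := pvParas ((PySem.Str.split? content "\n").getD [])
    let relevant1 := pvFindKwA paragraphs
    let relevant2 := match relevant1 with
      | some p => some p
      | none => pvFindSubA paragraphs
    let relevant_para : String := match relevant2 with
      | some p => p
      | none => PySem.Str.slice content none (some max_length)
    if max_length < PySem.Str.len relevant_para then
      PySem.Str.slice relevant_para none (some max_length) ++ "..."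
    else relevant_para

-- ===== PORT B =====
def pvHasKwB (para : String) : Bool :=
  let low := PySem.Str.lower para
  pvKeywords.any (fun k => PySem.Str.isIn k low)

-- the single loop of Source B: returns (kw_para, sub_para); breaks on a keyword hit
def pvScanB : List String → Option String → Option String × Option String
  | [], sub => (none, sub)
  | raw :: rest, sub =>
    let para := PySem.Str.strip raw
    if para = "" then pvScanB rest sub
    else if pvHasKwB para then (some para, sub)
    else pvScanB rest (if sub.isNone && 50 < PySem.Str.len para then some para else sub)

def extract_meaningful_excerpt_py_alt (content : String) (max_length : Int) : String :=
  if content = "" then "Konten tidak tersedia"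
  else
    let r := pvScanB ((PySem.Str.split? content "\n").getD []) none
    let best : String := match r.1 with
      | some p => p
      | none => match r.2 with
        | some p => p
        | none => PySem.Str.slice content none (some max_length)
    if max_length < PySem.Str.len best then
      PySem.Str.slice best none (some max_length) ++ "..."
    else best

-- ===== PRECONDITION & SPEC =====
def Spec_extract_meaningful_excerpt_py (content : String) (max_length : Int) (out : String) : Prop := out = extract_meaningful_excerpt_py_alt content max_length
instance (content : String) (max_length : Int) (out : String) : Decidable (Spec_extract_meaningful_excerpt_py content max_length out) := by unfold Spec_extract_meaningful_excerpt_py; infer_instance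

-- ===== CLAIM (what is proved, stated in full; the proofs are below) =====
def Claim_equal_extract_meaningful_excerpt_py : Prop := ∀ (content : String) (max_length : Int), Dom_extract_meaningful_excerpt_py content max_length → Spec_extract_meaningful_excerpt_py content max_length (extract_meaningful_excerpt_py content max_length)

-- ===== LEMMAS AND PROOFS =====

def pvOr (a b : Option String) : Option String :=
  match a with | some p => some p | none => b

theorem pvHasKw_eq (p : String) : pvHasKwB p = pvHasKwA p := rfl

theorem pvScanB_fst (raws : List String) (sub : Option String) :
    (pvScanB raws sub).1 = pvFindKwA (pvParas raws) := by
  induction raws generalizing sub with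
  | nil => rfl
  | cons raw rest ih =>
    by_cases hs : PySem.Str.strip raw = ""
    · simp [pvScanB, pvParas, hs, ih]
    · by_cases hk : pvHasKwA (PySem.Str.strip raw)
      · simp [pvScanB, pvParas, pvFindKwA, pvHasKw_eq, hs, hk]
      · simp [pvScanB, pvParas, pvFindKwA, pvHasKw_eq, hs, hk, ih]

theorem pvScanB_snd (raws : List String) (sub : Option String)
    (h : (pvScanB raws sub).1 = none) :
    (pvScanB raws sub).2 = pvOr sub (pvFindSubA (pvParas raws)) := by
  induction raws generalizing sub with
  | nil => cases sub <;> rfl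
  | cons raw rest ih =>
    by_cases hs : PySem.Str.strip raw = ""
    · have hstep : pvScanB (raw :: rest) sub = pvScanB rest sub := by simp [pvScanB, hs]
      rw [hstep] at h ⊢
      rw [ih sub h]
      simp [pvParas, hs]
    · by_cases hk : pvHasKwA (PySem.Str.strip raw)
      · exfalso
        revert h
        simp [pvScanB, hs, pvHasKw_eq, hk]
      · have hstep : pvScanB (raw :: rest) sub =
            pvScanB rest (if sub.isNone && decide (50 < PySem.Str.len (PySem.Str.strip raw))
              then some (PySem.Str.strip raw) else sub) := by
          simp [pvScanB, hs, pvHasKw_eq, hk]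
        rw [hstep] at h ⊢
        rw [ih _ h]
        cases sub with
        | some p => simp [pvOr]
        | none =>
          simp only [pvOr, pvParas, pvFindSubA, List.filterMap_cons, if_neg hs,
            Option.isNone_none, Bool.true_and]
          by_cases hl : (50 : Int) < PySem.Str.len (PySem.Str.strip raw)
          · rw [if_pos (decide_eq_true hl), if_pos hl]
          · rw [if_neg (by simpa using hl), if_neg hl]

theorem pvPick_eq (raws : List String) (fb : String) :
    (match (match pvFindKwA (pvParas raws) with
            | some p => some p
            | none => pvFindSubA (pvParas raws)) with
      | some p => p
      | none => fb) =
    (match (pvScanB raws none).1 with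
      | some p => p
      | none => match (pvScanB raws none).2 with
        | some p => p
        | none => fb) := by
  have h1 := pvScanB_fst raws none
  cases hkw : pvFindKwA (pvParas raws) with
  | some p => rw [h1, hkw]
  | none =>
    rw [h1, hkw]
    have h2 := pvScanB_snd raws none (by rw [h1, hkw])
    rw [h2]
    simp [pvOr]

-- ===== VERDICT (by name: the statement is the Claim_ definition above) =====
theorem extract_meaningful_excerpt_py_spec : Claim_equal_extract_meaningful_excerpt_py := by
  intro content max_length _
  unfold Spec_extract_meaningful_excerpt_py extract_meaningful_excerpt_py extract_meaningful_excerpt_py_alt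
  by_cases hc : content = ""
  · simp [hc]
  · simp only [if_neg hc]
    rw [pvPick_eq ((PySem.Str.split? content "\n").getD [])
        (PySem.Str.slice content none (some max_length))]
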